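-- pv_equiv track=rewrite | github.com/vanschependom/KULAK_beginselen-van-programmeren | HC7/slides-les7-complexiteit-intuitief.py | loketRijenMetPrefix
-- ===== SOURCE A (Python) =====
-- def loketRijenMetPrefix(prefix,verschilAB,lengte):
--     '''
--     Genereert alle mogelijke loketrijen (strings) met letters A en B
--     die starten met de gegeven prefix, en <lengte> langer zijn dan de prefix,
--     zodat voor elke positie geldt dat het aantal A's tot die positie
--     groter of gelijk is aan het aantal B's tot die positie.
--     Parameters
--     ----------
--     prefix : str
--     verschilAB : int
--         het verschil tussen het aantal A's en B's in de prefix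
--     lengte : int
--     Returns
--     -------
--     [str]
--         de lijst met toegelaten loketrijen (strings)
--     '''
--     if lengte == 0:
--         return [prefix]
--     if verschilAB > 0:
--         # dan kan er na de prefix zowel een A als een B komen
--         return loketRijenMetPrefix(prefix+'A',verschilAB+1,lengte-1) + \
--                loketRijenMetPrefix(prefix+'B',verschilAB-1,lengte-1)
--     else:
--         # dan mag er enkel een A komen na de prefix
--         return loketRijenMetPrefix(prefix+'A',verschilAB+1,lengte-1)
-- ===== SOURCE B (Python) =====
-- def loketRijenMetPrefix(prefix, verschilAB, lengte):
--     # Iterative level-by-level expansion of a worklist of partial rows.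
--     work = [(prefix, verschilAB)]
--     for _ in range(lengte):
--         new = []
--         for p, v in work:
--             new.append((p + 'A', v + 1))
--             if v > 0:
--                 new.append((p + 'B', v - 1))
--         work = new
--     return [p for p, _ in work]
-- ===== Notes on version B (the rewrite author's own statement) =====
-- stated objective: alternative
-- what changed: Replaces the branching recursion by an iterative breadth-first worklist that expands all partial rows one level per pass; a proof that level order equals the DFS order (both are lexicographic with A before B) carries the equivalence.
import Mathlib
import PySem

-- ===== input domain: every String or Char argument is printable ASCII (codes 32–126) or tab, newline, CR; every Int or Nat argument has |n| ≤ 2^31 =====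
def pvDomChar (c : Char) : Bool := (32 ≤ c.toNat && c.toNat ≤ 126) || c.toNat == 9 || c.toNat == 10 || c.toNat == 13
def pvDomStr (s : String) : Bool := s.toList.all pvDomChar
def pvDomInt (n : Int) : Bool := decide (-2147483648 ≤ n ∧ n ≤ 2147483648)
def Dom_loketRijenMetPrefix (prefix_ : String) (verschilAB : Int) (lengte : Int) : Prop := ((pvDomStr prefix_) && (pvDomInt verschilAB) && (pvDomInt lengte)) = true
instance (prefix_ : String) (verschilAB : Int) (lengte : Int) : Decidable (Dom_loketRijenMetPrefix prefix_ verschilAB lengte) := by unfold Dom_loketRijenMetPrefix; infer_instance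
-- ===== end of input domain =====

-- B replaces A's branching recursion by an iterative level-by-level worklist expansion (same output, same cost; objective: alternative).


-- ===== PORT A =====
-- A recurses on lengte-1 with base case lengte == 0; for lengte < 0 the Python never
-- reaches the base case (RecursionError), so the recursion depth is exactly lengte.toNat
-- and we recurse on that Nat (faithful wherever the Python returns, i.e. on Pre_).
def loketRijenMetPrefixFuel (prefix_ : String) (verschilAB : Int) : Nat → List String
  | 0 => [prefix_]
  | n+1 =>
    if verschilAB > 0 then
      loketRijenMetPrefixFuel (prefix_ ++ "A") (verschilAB + 1) n ++
      loketRijenMetPrefixFuel (prefix_ ++ "B") (verschilAB - 1) n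
    else
      loketRijenMetPrefixFuel (prefix_ ++ "A") (verschilAB + 1) n

def loketRijenMetPrefix (prefix_ : String) (verschilAB : Int) (lengte : Int) : List String :=
  loketRijenMetPrefixFuel prefix_ verschilAB lengte.toNat

-- ===== PORT B =====
-- one partial row expanded: A-child always, B-child only when verschilAB > 0
def pvExpand (pv : String × Int) : List (String × Int) :=
  (pv.1 ++ "A", pv.2 + 1) :: (if pv.2 > 0 then [(pv.1 ++ "B", pv.2 - 1)] else [])

-- Source B: work = [(prefix, verschilAB)]; for _ in range(lengte): rebuild work by appending
-- each partial's children in order; finally project the strings.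
def loketRijenMetPrefix_alt (prefix_ : String) (verschilAB : Int) (lengte : Int) : List String :=
  ((List.range lengte.toNat).foldl
      (fun work _ => work.foldl (fun new pv => new ++ pvExpand pv) [])
      [(prefix_, verschilAB)]).map Prod.fst

-- ===== PRECONDITION & SPEC =====
-- Pre_ excludes lengte < 0, where the Python A never reaches its base case and raises RecursionError.
def Pre_loketRijenMetPrefix (prefix_ : String) (verschilAB : Int) (lengte : Int) : Prop := 0 ≤ lengte
instance (prefix_ : String) (verschilAB : Int) (lengte : Int) : Decidable (Pre_loketRijenMetPrefix prefix_ verschilAB lengte) := by unfold Pre_loketRijenMetPrefix; infer_instance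
def pvWitness_loketRijenMetPrefix : String × Int × Int := ("A", 1, 2)

def Spec_loketRijenMetPrefix (prefix_ : String) (verschilAB : Int) (lengte : Int) (out : List String) : Prop := out = loketRijenMetPrefix_alt prefix_ verschilAB lengte
instance (prefix_ : String) (verschilAB : Int) (lengte : Int) (out : List String) : Decidable (Spec_loketRijenMetPrefix prefix_ verschilAB lengte out) := by unfold Spec_loketRijenMetPrefix; infer_instance

-- ===== CLAIM (what is proved, stated in full; the proofs are below) =====
def Claim_equal_loketRijenMetPrefix : Prop := ∀ (prefix_ : String) (verschilAB : Int) (lengte : Int), Dom_loketRijenMetPrefix prefix_ verschilAB lengte → Pre_loketRijenMetPrefix prefix_ verschilAB lengte → Spec_loketRijenMetPrefix prefix_ verschilAB lengte (loketRijenMetPrefix prefix_ verschilAB lengte)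

-- ===== LEMMAS AND PROOFS =====

-- the inner for-loop of Source B builds exactly the flatMap of pvExpand
theorem pv_inner_foldl (w : List (String × Int)) (acc : List (String × Int)) :
    w.foldl (fun new pv => new ++ pvExpand pv) acc = acc ++ w.flatMap pvExpand := by
  induction w generalizing acc with
  | nil => simp
  | cons h t ih => simp [List.foldl, ih]

-- the outer loop ignores the range elements: n passes of the flatMap step
def pvStepIter : Nat → List (String × Int) → List (String × Int)
  | 0, w => w
  | n+1, w => pvStepIter n (w.flatMap pvExpand)

theorem pv_outer_foldl (l : List Nat) (w : List (String × Int)) :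
    l.foldl (fun work _ => work.foldl (fun new pv => new ++ pvExpand pv) []) w
      = pvStepIter l.length w := by
  induction l generalizing w with
  | nil => rfl
  | cons h t ih =>
    rw [List.foldl_cons, pv_inner_foldl, List.nil_append, ih]
    rfl

-- level-by-level expansion computes A's DFS recursion at each partial
theorem pv_key (n : Nat) (w : List (String × Int)) :
    (pvStepIter n w).map Prod.fst = w.flatMap (fun pv => loketRijenMetPrefixFuel pv.1 pv.2 n) := by
  induction n generalizing w with
  | zero =>
    simp [pvStepIter, loketRijenMetPrefixFuel]
    induction w with
    | nil => rfl
    | cons h t ih => simp [List.flatMap_cons, ih]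
  | succ n ih =>
    rw [pvStepIter, ih, List.flatMap_assoc]
    refine List.flatMap_congr (fun pv _ => ?_)
    rcases pv with ⟨p, v⟩
    by_cases hv : v > 0 <;>
      simp [pvExpand, loketRijenMetPrefixFuel, hv]

-- ===== VERDICT (by name: the statement is the Claim_ definition above) =====
theorem loketRijenMetPrefix_spec : Claim_equal_loketRijenMetPrefix := by
  intro p v l _ _
  unfold Spec_loketRijenMetPrefix loketRijenMetPrefix loketRijenMetPrefix_alt
  rw [pv_outer_foldl, List.length_range, pv_key]
  simp
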